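-- pv_equiv track=rewrite | github.com/pearlww/Intro-to-AI | Belief revision agent/utils.py | seperateAnd
-- ===== SOURCE A (Python) =====
-- def seperateAnd(sentence_list_total, sentence):  # seperate all sentences containing AND (not within parentheses)
--     paran = 0
--     for i in range(len(sentence)):
--
--         if sentence[i] == '(':
--             paran += 1
--
--         if sentence[i] == 'a' and paran == 0:
--             if len(sentence[0:i]) > 0:
--                 sentence_list_total.append(sentence[0:i])
--             sentence_temp = sentence[i + 1:]
--             return seperateAnd(sentence_list_total, sentence_temp)
--
--         if sentence[i] == ')' and paran == 0:
--             sentence_list_total.append(sentence[0:i + 1])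
--             sentence_temp = sentence[i + 1:]
--             return seperateAnd(sentence_list_total, sentence_temp)
--
--         if sentence[i] == ')':
--             paran -= 1
--
--         if not 'a' in sentence:
--             sentence_list_total.append(sentence)
--             break
--
--         if i == len(sentence)-1:
--             sentence_list_total.append(sentence)
--             break
--
--     return sentence_list_total
-- ===== SOURCE B (Python) =====
-- # Iterative single-pass splitter: a while loop over the remaining segment with one
-- # depth-tracking scan per segment; the O(n) "'a' in sentence" membership test is
-- # hoisted out of the character loop (computed once per segment).
-- # Like A, mutates sentence_list_total in place and returns it.
-- def seperateAnd(sentence_list_total, sentence):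
--     s = sentence
--     while s:
--         has_a = 'a' in s
--         depth = 0
--         cut = None
--         for i, c in enumerate(s):
--             if c == '(':
--                 depth += 1
--             elif c == 'a' and depth == 0:
--                 cut = (True, i)
--                 break
--             elif c == ')':
--                 if depth == 0:
--                     cut = (False, i)
--                     break
--                 depth -= 1
--             if not has_a:
--                 break
--         if cut is None:
--             sentence_list_total.append(s)
--             break
--         is_and, i = cut
--         if is_and:
--             if i > 0:
--                 sentence_list_total.append(s[:i])
--         else:
--             sentence_list_total.append(s[:i + 1])
--         s = s[i + 1:]
--     return sentence_list_total
-- ===== Notes on version B (the rewrite author's own statement) =====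
-- stated objective: faster
-- what changed: Replaces A's recursion-per-segment with an iterative while loop and hoists A's per-character O(n) "'a' in sentence" rescan out of the inner loop, computing it once per segment.
import Mathlib
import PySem

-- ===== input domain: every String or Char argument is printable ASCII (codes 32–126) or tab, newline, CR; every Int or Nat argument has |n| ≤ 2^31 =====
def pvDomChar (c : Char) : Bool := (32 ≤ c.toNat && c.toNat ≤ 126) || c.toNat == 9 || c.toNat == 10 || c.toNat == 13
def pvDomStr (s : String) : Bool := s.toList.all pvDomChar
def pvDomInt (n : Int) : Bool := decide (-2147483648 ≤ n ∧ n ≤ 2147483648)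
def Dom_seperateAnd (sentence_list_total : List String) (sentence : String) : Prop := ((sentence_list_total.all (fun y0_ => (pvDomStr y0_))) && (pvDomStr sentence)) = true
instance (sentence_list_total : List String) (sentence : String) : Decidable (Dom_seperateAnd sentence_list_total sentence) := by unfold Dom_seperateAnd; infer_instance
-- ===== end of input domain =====

-- B replaces A's recursion with an iterative while loop whose per-segment scan hoists the
-- "'a' in sentence" membership test out of the character loop (objective: faster; A rescans
-- the string for 'a' on every loop iteration). Like A, the Python B mutates
-- sentence_list_total in place and returns it (same side effect); the equivalence proved
-- here is about the return value.


-- ===== PORT A =====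
-- A's `for i in range(len(sentence))` with early `return`/`break` becomes structural
-- recursion on i; each `return seperateAnd(...)` restarts the loop (i = 0, paran = 0) on the
-- suffix. Strings are handled as List Char (PySem.Chars convention): sentence[i] for the
-- in-range loop index i is s[i]; the slices sentence[0:i] / sentence[i+1:] are s.take i /
-- s.drop (i+1) (nonnegative in-range bounds, exact); `'a' in sentence` for the single-char
-- needle 'a' is exactly the char membership 'a' ∈ s (exact).
-- measure facts cited by seperateAndGo's decreasing_by
theorem pvDecA_drop (s : List Char) (i : Nat) (h : i < s.length) :
    2 * (s.drop (i + 1)).length - 0 < 2 * s.length - i := by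
  rw [List.length_drop]; omega
theorem pvDecA_step (s : List Char) (i : Nat) (h : i < s.length) :
    2 * s.length - (i + 1) < 2 * s.length - i := by omega

def seperateAndGo (acc : List String) (s : List Char) (i : Nat) (paran : Int) : List String :=
  if h : i < s.length then
    let c := s[i]
    let paran1 := if c = '(' then paran + 1 else paran
    if c = 'a' ∧ paran1 = 0 then
      seperateAndGo (if 0 < (s.take i).length then acc ++ [String.ofList (s.take i)] else acc)
        (s.drop (i + 1)) 0 0
    else if c = ')' ∧ paran1 = 0 then
      seperateAndGo (acc ++ [String.ofList (s.take (i + 1))]) (s.drop (i + 1)) 0 0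
    else
      let paran2 := if c = ')' then paran1 - 1 else paran1
      if 'a' ∉ s then acc ++ [String.ofList s]
      else if i = s.length - 1 then acc ++ [String.ofList s]
      else seperateAndGo acc s (i + 1) paran2
  else acc
termination_by 2 * s.length - i
decreasing_by
  · exact pvDecA_drop s i h
  · exact pvDecA_drop s i h
  · exact pvDecA_step s i h

def seperateAnd (sentence_list_total : List String) (sentence : String) : List String :=
  seperateAndGo sentence_list_total sentence.toList 0 0

-- ===== PORT B =====
-- B's inner `for i, c in enumerate(s)` scan: returns the first cut `(is_and, i)`, or none
-- when the loop breaks early (`if not has_a: break`) or runs off the end.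
-- measure fact cited by the scan's decreasing_by
theorem pvDecScan (s : List Char) (i : Nat) (h : i < s.length) :
    s.length - (i + 1) < s.length - i := by omega

def altScan (s : List Char) (hasA : Bool) (i : Nat) (depth : Int) : Option (Bool × Nat) :=
  if h : i < s.length then
    let c := s[i]
    if c = '(' then
      if hasA then altScan s hasA (i + 1) (depth + 1) else none
    else if c = 'a' ∧ depth = 0 then some (true, i)
    else if c = ')' then
      if depth = 0 then some (false, i)
      else if hasA then altScan s hasA (i + 1) (depth - 1) else none
    else if hasA then altScan s hasA (i + 1) depth else none
  else none
termination_by s.length - i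
decreasing_by
  · exact pvDecScan s i h
  · exact pvDecScan s i h
  · exact pvDecScan s i h

-- measure fact cited by the while loop's decreasing_by
theorem pvDecB_drop (s : List Char) (i : Nat) (hsn : s ≠ []) :
    (s.drop (i + 1)).length < s.length := by
  rw [List.length_drop]
  exact Nat.sub_lt (List.length_pos_iff.mpr hsn) (Nat.succ_pos _)

-- B's `while s:` loop.
def seperateAndAltGo (acc : List String) (s : List Char) : List String :=
  if hsn : s = [] then acc
  else
    match altScan s (decide ('a' ∈ s)) 0 0 with
    | none => acc ++ [String.ofList s]
    | some (true, i) =>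
        seperateAndAltGo (if 0 < i then acc ++ [String.ofList (s.take i)] else acc) (s.drop (i + 1))
    | some (false, i) =>
        seperateAndAltGo (acc ++ [String.ofList (s.take (i + 1))]) (s.drop (i + 1))
termination_by s.length
decreasing_by
  · exact pvDecB_drop s _ hsn
  · exact pvDecB_drop s _ hsn

def seperateAnd_alt (sentence_list_total : List String) (sentence : String) : List String :=
  seperateAndAltGo sentence_list_total sentence.toList

-- ===== PRECONDITION & SPEC =====
def Spec_seperateAnd (sentence_list_total : List String) (sentence : String) (out : List String) : Prop := out = seperateAnd_alt sentence_list_total sentence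
instance (sentence_list_total : List String) (sentence : String) (out : List String) : Decidable (Spec_seperateAnd sentence_list_total sentence out) := by unfold Spec_seperateAnd; infer_instance

-- ===== CLAIM (what is proved, stated in full; the proofs are below) =====
def Claim_equal_seperateAnd : Prop := ∀ (sentence_list_total : List String) (sentence : String), Dom_seperateAnd sentence_list_total sentence → Spec_seperateAnd sentence_list_total sentence (seperateAnd sentence_list_total sentence)

-- ===== LEMMAS AND PROOFS =====

-- the cut index returned by B's scan is in range
theorem altScan_lt {s : List Char} {hasA : Bool} {b : Bool} {j : Nat} :
    ∀ {i : Nat} {depth : Int}, altScan s hasA i depth = some (b, j) → j < s.length := by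
  intro i depth h
  fun_induction altScan s hasA i depth with
  | case1 => simp_all
  | case2 => simp_all
  | case3 i depth h c hc hca => simp_all; omega
  | case4 => simp_all; omega
  | case5 => simp_all
  | case6 => simp_all
  | case7 => simp_all
  | case8 => simp_all
  | case9 => simp_all


-- On a segment containing 'a', A's loop from (i, paran) does what B's scan from (i, paran)
-- prescribes: A's early-break membership test never fires, so both walk the same characters
-- with the same depth until the first cut (or the end of the segment).
theorem A_loop_eq_scan (s : List Char) (ha : 'a' ∈ s) :
    ∀ k i paran acc, s.length - i ≤ k → i < s.length →
      seperateAndGo acc s i paran =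
        match altScan s true i paran with
        | none => acc ++ [String.ofList s]
        | some (true, j) =>
            seperateAndGo (if 0 < (s.take j).length then acc ++ [String.ofList (s.take j)] else acc)
              (s.drop (j + 1)) 0 0
        | some (false, j) =>
            seperateAndGo (acc ++ [String.ofList (s.take (j + 1))]) (s.drop (j + 1)) 0 0 := by
  intro k
  induction k with
  | zero => intro i paran acc hk hi; omega
  | succ k ih =>
    intro i paran acc hk hi
    rw [seperateAndGo, altScan]
    simp only [dif_pos hi, ha, not_true_eq_false, if_false, if_true]
    have step : ∀ p' : Int,
        (if i = s.length - 1 then acc ++ [String.ofList s] else seperateAndGo acc s (i + 1) p') =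
          match altScan s true (i + 1) p' with
          | none => acc ++ [String.ofList s]
          | some (true, j) =>
              seperateAndGo (if 0 < (s.take j).length then acc ++ [String.ofList (s.take j)] else acc)
                (s.drop (j + 1)) 0 0
          | some (false, j) =>
              seperateAndGo (acc ++ [String.ofList (s.take (j + 1))]) (s.drop (j + 1)) 0 0 := by
      intro p'
      by_cases hl : i = s.length - 1
      · rw [if_pos hl, altScan]
        simp only [dif_neg (show ¬ (i + 1 < s.length) by omega)]
      · rw [if_neg hl]
        exact ih (i + 1) p' acc (by omega) (by omega)
    by_cases hc1 : s[i] = '('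
    · have hca : s[i] ≠ 'a' := by rw [hc1]; decide
      have hcp : s[i] ≠ ')' := by rw [hc1]; decide
      simp only [if_pos hc1, hca, false_and, if_false, hcp]
      exact step (paran + 1)
    · by_cases hc2 : s[i] = 'a'
      · have hcp : s[i] ≠ ')' := by rw [hc2]; decide
        by_cases hp : paran = 0
        · simp only [if_neg hc1, if_pos (And.intro hc2 hp), hc2, hp]
          simp
        · have e1 : (s[i] = 'a' ∧ paran = 0) = False := eq_false (fun h => hp h.2)
          have e2 : (s[i] = ')' ∧ paran = 0) = False := eq_false (fun h => hcp h.1)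
          simp only [if_neg hc1, if_neg hcp, e1, e2, if_false]
          exact step paran
      · by_cases hc3 : s[i] = ')'
        · by_cases hp : paran = 0
          · simp only [if_neg hc1, if_pos (And.intro hc3 hp), hc2, false_and, if_false,
              if_neg (show ¬ (s[i] = 'a' ∧ (if s[i] = '(' then paran + 1 else paran) = 0) from
                fun h => hc2 h.1), hc3, hp]
            simp
          · have e1 : (s[i] = 'a' ∧ paran = 0) = False := eq_false (fun h => hc2 h.1)
            have e2 : (s[i] = ')' ∧ paran = 0) = False := eq_false (fun h => hp h.2)
            simp only [if_neg hc1, e1, e2, if_false, if_pos hc3, if_neg hp]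
            exact step (paran - 1)
        · have e1 : (s[i] = 'a' ∧ paran = 0) = False := eq_false (fun h => hc2 h.1)
          have e2 : (s[i] = ')' ∧ paran = 0) = False := eq_false (fun h => hc3 h.1)
          simp only [if_neg hc1, if_neg hc3, e1, e2, if_false]
          exact step paran

-- unfolding equations for B's while loop (one per shape of the scan's result)
theorem altGo_eq_none {acc : List String} {s : List Char} (hs : s ≠ [])
    (h : altScan s (decide ('a' ∈ s)) 0 0 = none) :
    seperateAndAltGo acc s = acc ++ [String.ofList s] := by
  rw [seperateAndAltGo]; simp only [dif_neg hs]; split <;> simp_all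

theorem altGo_eq_true {acc : List String} {s : List Char} {i : Nat} (hs : s ≠ [])
    (h : altScan s (decide ('a' ∈ s)) 0 0 = some (true, i)) :
    seperateAndAltGo acc s =
      seperateAndAltGo (if 0 < i then acc ++ [String.ofList (s.take i)] else acc) (s.drop (i + 1)) := by
  rw [seperateAndAltGo]; simp only [dif_neg hs]; split <;> simp_all

theorem altGo_eq_false {acc : List String} {s : List Char} {i : Nat} (hs : s ≠ [])
    (h : altScan s (decide ('a' ∈ s)) 0 0 = some (false, i)) :
    seperateAndAltGo acc s =
      seperateAndAltGo (acc ++ [String.ofList (s.take (i + 1))]) (s.drop (i + 1)) := by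
  rw [seperateAndAltGo]; simp only [dif_neg hs]; split <;> simp_all

-- A = B, by strong induction on the segment length: a segment containing 'a' goes through
-- A_loop_eq_scan; a segment without 'a' is handled by one unfolding of both loops (A breaks
-- after its first character exactly where B's scan does).
theorem A_eq_B : ∀ n s acc, s.length ≤ n → seperateAndGo acc s 0 0 = seperateAndAltGo acc s := by
  intro n
  induction n with
  | zero =>
    intro s acc h
    have hs : s = [] := List.eq_nil_of_length_eq_zero (by omega)
    subst hs
    rw [seperateAndGo, seperateAndAltGo]
    simp
  | succ n ih =>
    intro s acc hn
    rcases eq_or_ne s [] with rfl | hs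
    · rw [seperateAndGo, seperateAndAltGo]
      simp
    · have hlen : 0 < s.length := List.length_pos_iff.mpr hs
      by_cases ha : 'a' ∈ s
      · rw [A_loop_eq_scan s ha s.length 0 0 acc (by omega) hlen]
        cases hcut : altScan s true 0 0 with
        | none => rw [altGo_eq_none hs (by rw [decide_eq_true ha]; exact hcut)]
        | some p =>
          obtain ⟨b, j⟩ := p
          have hj : j < s.length := altScan_lt hcut
          cases b
          · rw [altGo_eq_false hs (by rw [decide_eq_true ha]; exact hcut)]
            exact ih _ _ (by simp; omega)
          · rw [altGo_eq_true hs (by rw [decide_eq_true ha]; exact hcut)]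
            have htl : (s.take j).length = j := by simp; omega
            show seperateAndGo (if 0 < (s.take j).length then acc ++ [String.ofList (s.take j)] else acc)
              (s.drop (j + 1)) 0 0 = _
            rw [htl]
            exact ih _ _ (by simp; omega)
      · have hca : s[0] ≠ 'a' := fun h => ha (h ▸ List.getElem_mem hlen)
        by_cases hcp : s[0] = ')'
        · have hc1 : s[0] ≠ '(' := by rw [hcp]; decide
          have hscan : altScan s (decide ('a' ∈ s)) 0 0 = some (false, 0) := by
            rw [altScan]; simp [hlen, hc1, hcp, hca]
          rw [altGo_eq_false hs hscan, seperateAndGo]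
          simp only [dif_pos hlen]
          simp [hcp, ha]
          exact ih _ _ (by simp; omega)
        · have hscan : altScan s (decide ('a' ∈ s)) 0 0 = none := by
            rw [altScan]
            by_cases hc1 : s[0] = '('
            · simp [hlen, hc1, decide_eq_false ha]
            · simp [hlen, hc1, hca, hcp, decide_eq_false ha]
          rw [altGo_eq_none hs hscan, seperateAndGo]
          simp only [dif_pos hlen]
          by_cases hc1 : s[0] = '('
          · simp [hc1, ha]
          · simp [hc1, hca, hcp, ha]

-- ===== VERDICT (by name: the statement is the Claim_ definition above) =====
theorem seperateAnd_spec : Claim_equal_seperateAnd := by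
  intro lst s _
  unfold Spec_seperateAnd seperateAnd seperateAnd_alt
  exact A_eq_B s.toList.length s.toList lst le_rfl
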